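-- pv_equiv track=rewrite | github.com/lulesna/studia | Python/steganografia-i-znaki-wodne/stegano.py | metoda_2_wyodrebnianie
-- ===== SOURCE A (Python) =====
-- def usun_koncowe_zera(bity):
--     ostatnia_jedynka = bity.rfind('1')
--
--     if ostatnia_jedynka == -1:
--         # same zera
--         return ''
--
--     # zwraca bity do ostatniej jedynki włącznie
--     # zaokrągla w górę do pełnej grupy 4 bitów
--     koniec = ostatnia_jedynka + 1
--     if koniec % 4 != 0:
--         koniec = ((koniec // 4) + 1) * 4
--
--     return bity[:koniec]
--
-- def metoda_2_wyodrebnianie(znak_wodny):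
--     wiersze = znak_wodny.split('\n')
--     bity = ""
--
--     for wiersz in wiersze:
--         wiersz = wiersz.rstrip()  # usunięcie spacji z końca
--         i = 0
--         while i < len(wiersz):
--             if i < len(wiersz) - 1 and wiersz[i] == ' ' and wiersz[i + 1] == ' ':
--                 bity += '1'
--                 i += 2
--             elif wiersz[i] == ' ':
--                 bity += '0'
--                 i += 1
--             else:
--                 i += 1
--
--     return usun_koncowe_zera(bity)
-- ===== SOURCE B (Python) =====
-- def metoda_2_wyodrebnianie(znak_wodny):
--     # run-length decomposition: each maximal run of k spaces contributes '1'*(k//2) + '0'*(k%2)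
--     kawalki = []
--     for wiersz in znak_wodny.split('\n'):
--         run = 0
--         for ch in wiersz.rstrip():
--             if ch == ' ':
--                 run += 1
--             else:
--                 kawalki.append('1' * (run // 2) + '0' * (run % 2))
--                 run = 0
--         kawalki.append('1' * (run // 2) + '0' * (run % 2))
--     bity = ''.join(kawalki)
--     k = bity.rfind('1')
--     if k == -1:
--         return ''
--     return bity[: (k // 4 + 1) * 4]
-- ===== Notes on version B (the rewrite author's own statement) =====
-- stated objective: simpler
-- what changed: Replaces A's stateful greedy 1-or-2-character index pointer over each line by a run-length decomposition (count each maximal run of k spaces and emit k//2 one-bits plus one zero-bit when k is odd, joined across lines) and replaces the two-step conditional round-up in the trailing-zero helper by the closed form (k//4+1)*4.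
import Mathlib
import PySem

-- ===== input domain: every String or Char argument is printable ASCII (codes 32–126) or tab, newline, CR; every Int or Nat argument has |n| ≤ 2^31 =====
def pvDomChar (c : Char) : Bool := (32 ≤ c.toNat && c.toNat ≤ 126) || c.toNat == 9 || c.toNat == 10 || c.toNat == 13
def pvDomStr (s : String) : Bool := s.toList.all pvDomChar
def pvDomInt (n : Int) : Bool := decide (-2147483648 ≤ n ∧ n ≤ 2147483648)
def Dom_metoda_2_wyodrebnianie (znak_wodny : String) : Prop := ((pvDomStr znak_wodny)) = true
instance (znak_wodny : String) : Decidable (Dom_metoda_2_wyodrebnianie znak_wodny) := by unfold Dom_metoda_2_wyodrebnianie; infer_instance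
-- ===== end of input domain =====

-- B replaces A's stateful 1-or-2-character pointer scan by a run-length decomposition
-- (count each maximal space run, map run length k to '1'*(k//2) + '0'*(k%2)) and a
-- closed-form round-up in place of the trailing-zero helper; objective: simpler.

-- ===== PORT A =====
-- usun_koncowe_zera, on the List Char side (koniec's two-step update written as one if-expression)
def pvKoniec (ostatnia_jedynka : Int) : Int :=
  if PySem.Int.mod (ostatnia_jedynka + 1) 4 != 0 then
    (PySem.Int.floordiv (ostatnia_jedynka + 1) 4 + 1) * 4
  else ostatnia_jedynka + 1

def pvUsunKoncoweZera (bity : List Char) : List Char :=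
  if PySem.Chars.rfind bity ['1'] == -1 then []
  else PySem.Chars.slice bity none (some (pvKoniec (PySem.Chars.rfind bity ['1'])))

-- the while loop of A: consumes the remaining characters, appending to the bity accumulator
def pvScanA (bity : List Char) : List Char → List Char
  | [] => bity
  | [c] => if c = ' ' then bity ++ ['0'] else bity
  | c :: d :: rest =>
      if c = ' ' ∧ d = ' ' then pvScanA (bity ++ ['1']) rest
      else if c = ' ' then pvScanA (bity ++ ['0']) (d :: rest)
      else pvScanA bity (d :: rest)

def metoda_2_wyodrebnianie (znak_wodny : String) : String :=
  String.ofList (pvUsunKoncoweZera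
    ((PySem.Chars.splitOn znak_wodny.toList ['\n']).foldl
      (fun b w => pvScanA b (PySem.Chars.rstrip w)) []))

-- ===== PORT B =====
-- run length k ↦ '1'*(k//2) + '0'*(k%2)
def pvBitsRun (r : Nat) : List Char := List.replicate (r / 2) '1' ++ List.replicate (r % 2) '0'

-- B's inner loop: count the current space run, flush it on a non-space and at the end
def pvLineBits : List Char → Nat → List Char
  | [], r => pvBitsRun r
  | c :: t, r => if c = ' ' then pvLineBits t (r + 1) else pvBitsRun r ++ pvLineBits t 0

-- B's closed-form trailing trim: rfind '1', round index up to a full 4-bit group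
def pvTrim (bity : List Char) : String :=
  if PySem.Chars.rfind bity ['1'] == -1 then ""
  else String.ofList (PySem.Chars.slice bity none
    (some ((PySem.Int.floordiv (PySem.Chars.rfind bity ['1']) 4 + 1) * 4)))

def metoda_2_wyodrebnianie_alt (znak_wodny : String) : String :=
  pvTrim (((PySem.Chars.splitOn znak_wodny.toList ['\n']).map
      (fun w => pvLineBits (PySem.Chars.rstrip w) 0)).flatten)

-- ===== PRECONDITION & SPEC =====
def Spec_metoda_2_wyodrebnianie (znak_wodny : String) (out : String) : Prop := out = metoda_2_wyodrebnianie_alt znak_wodny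
instance (znak_wodny : String) (out : String) : Decidable (Spec_metoda_2_wyodrebnianie znak_wodny out) := by unfold Spec_metoda_2_wyodrebnianie; infer_instance

-- ===== CLAIM (what is proved, stated in full; the proofs are below) =====
def Claim_equal_metoda_2_wyodrebnianie : Prop := ∀ (znak_wodny : String), Dom_metoda_2_wyodrebnianie znak_wodny → Spec_metoda_2_wyodrebnianie znak_wodny (metoda_2_wyodrebnianie znak_wodny)

-- ===== LEMMAS AND PROOFS =====

-- A's scan with accumulator b is b ++ the scan from the empty accumulator
theorem pvScanA_acc : ∀ (w b : List Char), pvScanA b w = b ++ pvScanA [] w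
  | [], b => by simp [pvScanA]
  | [c], b => by by_cases h : c = ' ' <;> simp [pvScanA, h]
  | c :: d :: rest, b => by
      by_cases h : c = ' ' ∧ d = ' '
      · rw [pvScanA, pvScanA, if_pos h, if_pos h, pvScanA_acc rest (b ++ ['1']),
            pvScanA_acc rest ([] ++ ['1'])]
        simp
      · by_cases h2 : c = ' '
        · rw [pvScanA, pvScanA, if_neg h, if_neg h, if_pos h2, if_pos h2,
              pvScanA_acc (d :: rest) (b ++ ['0']), pvScanA_acc (d :: rest) ([] ++ ['0'])]
          simp
        · rw [pvScanA, pvScanA, if_neg h, if_neg h, if_neg h2, if_neg h2,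
              pvScanA_acc (d :: rest) b]

theorem pvScanA_nonspace (c : Char) (t : List Char) (hc : c ≠ ' ') :
    pvScanA [] (c :: t) = pvScanA [] t := by
  cases t with
  | nil => simp [pvScanA, hc]
  | cons d rest =>
      rw [pvScanA, if_neg (by simp [hc]), if_neg hc]

theorem pvBitsRun_succ_succ (r : Nat) : pvBitsRun (r + 2) = '1' :: pvBitsRun r := by
  have h1 : (r + 2) / 2 = r / 2 + 1 := by omega
  have h2 : (r + 2) % 2 = r % 2 := by omega
  simp [pvBitsRun, h1, h2, List.replicate_succ]

-- scan of a pure space run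
theorem pvScanA_spaces (r : Nat) : pvScanA [] (List.replicate r ' ') = pvBitsRun r := by
  induction r using Nat.strong_induction_on with
  | _ r ih =>
    match r with
    | 0 => simp [pvScanA, pvBitsRun]
    | 1 => simp [pvScanA, pvBitsRun]
    | (n + 2) =>
        rw [show List.replicate (n + 2) ' ' = ' ' :: ' ' :: List.replicate n ' ' by
              simp [List.replicate_succ]]
        rw [pvScanA, if_pos ⟨rfl, rfl⟩, pvScanA_acc, ih n (by omega), pvBitsRun_succ_succ]
        rfl

-- scan of a space run followed by a non-space character
theorem pvScanA_run (c : Char) (hc : c ≠ ' ') (r : Nat) (t : List Char) :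
    pvScanA [] (List.replicate r ' ' ++ c :: t) = pvBitsRun r ++ pvScanA [] (c :: t) := by
  induction r using Nat.strong_induction_on with
  | _ r ih =>
    match r with
    | 0 => simp [pvBitsRun]
    | 1 =>
        rw [show List.replicate 1 ' ' ++ c :: t = ' ' :: c :: t by rfl]
        rw [pvScanA, if_neg (by simp [hc]), if_pos rfl, pvScanA_acc]
        simp [pvBitsRun]
    | (n + 2) =>
        rw [show List.replicate (n + 2) ' ' ++ c :: t
              = ' ' :: ' ' :: (List.replicate n ' ' ++ c :: t) by simp [List.replicate_succ]]
        rw [pvScanA, if_pos ⟨rfl, rfl⟩, pvScanA_acc, ih n (by omega), pvBitsRun_succ_succ]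
        rfl

-- per line: B's run-counting fold equals A's pointer scan
theorem pvLineBits_eq (w : List Char) : ∀ r : Nat,
    pvLineBits w r = pvScanA [] (List.replicate r ' ' ++ w) := by
  induction w with
  | nil => intro r; simp [pvLineBits, pvScanA_spaces]
  | cons c t ih =>
      intro r
      by_cases hc : c = ' '
      · subst hc
        rw [pvLineBits, if_pos rfl, ih (r + 1),
            show List.replicate r ' ' ++ ' ' :: t = List.replicate (r + 1) ' ' ++ t by
              simp [List.replicate_succ']]
      · rw [pvLineBits, if_neg hc, ih 0, pvScanA_run c hc, pvScanA_nonspace c t hc]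
        rfl

-- the foldl over lines with appending scans is the flatten of the per-line scans
theorem pvFoldl_scan (ws : List (List Char)) : ∀ b : List Char,
    ws.foldl (fun b w => pvScanA b (PySem.Chars.rstrip w)) b
      = b ++ (ws.map (fun w => pvScanA [] (PySem.Chars.rstrip w))).flatten := by
  induction ws with
  | nil => intro b; simp
  | cons w ws ih =>
      intro b
      rw [List.foldl_cons, ih, pvScanA_acc]
      simp

-- A's if-then round-up equals B's closed form, for every Int
theorem pvKoniec_eq (k : Int) : pvKoniec k = (PySem.Int.floordiv k 4 + 1) * 4 := by
  unfold pvKoniec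
  rw [PySem.Int.floordiv_eq_ediv_of_pos (a := k + 1) (by norm_num),
      PySem.Int.floordiv_eq_ediv_of_pos (a := k) (by norm_num),
      PySem.Int.mod_eq_emod_of_pos (a := k + 1) (by norm_num)]
  have e1 := Int.mul_ediv_add_emod (k + 1) 4
  have e2 := Int.mul_ediv_add_emod k 4
  have m1 := Int.emod_nonneg (k + 1) (by norm_num : (4:Int) ≠ 0)
  have m2 := Int.emod_lt_of_pos (k + 1) (by norm_num : (0:Int) < 4)
  have m3 := Int.emod_nonneg k (by norm_num : (4:Int) ≠ 0)
  have m4 := Int.emod_lt_of_pos k (by norm_num : (0:Int) < 4)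
  split_ifs with h
  · simp only [bne_iff_ne, ne_eq] at h
    omega
  · simp only [bne_iff_ne, ne_eq, not_not] at h
    omega

-- ===== VERDICT (by name: the statement is the Claim_ definition above) =====
theorem metoda_2_wyodrebnianie_spec : Claim_equal_metoda_2_wyodrebnianie := by
  intro s _
  show metoda_2_wyodrebnianie s = metoda_2_wyodrebnianie_alt s
  unfold metoda_2_wyodrebnianie metoda_2_wyodrebnianie_alt pvUsunKoncoweZera pvTrim
  rw [pvFoldl_scan]
  have hmap : (PySem.Chars.splitOn s.toList ['\n']).map
        (fun w => pvScanA [] (PySem.Chars.rstrip w))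
      = (PySem.Chars.splitOn s.toList ['\n']).map
        (fun w => pvLineBits (PySem.Chars.rstrip w) 0) := by
    apply List.map_congr_left
    intro w _
    rw [pvLineBits_eq (PySem.Chars.rstrip w) 0]
    rfl
  rw [List.nil_append, hmap, pvKoniec_eq]
  split_ifs with h
  · rfl
  · rfl
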